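-- pv_equiv track=rewrite | github.com/MrBrantCode/unitest_baseline | mut_generate/mist_train_cf/cf_17580/solution.py | find_max_primes
-- ===== SOURCE A (Python) =====
-- import math
--
-- def find_max_primes(numbers):
--     """
--     This function finds the maximum prime number and the second maximum prime number in a list of positive integers.
--
--     Args:
--     numbers (list): A list of positive integers.
--
--     Returns:
--     tuple: A tuple containing the maximum prime number and the second maximum prime number.
--     If there are less than two prime numbers in the list, return the maximum prime number and 0.
--     """
--
--     # Initialize variables
--     maxPrime = 0
--     secondMaxPrime = 0
--
--     # Iterate through each number in the array
--     for num in numbers: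
--         # Check if the number is prime
--         isPrime = True
--         for i in range(2, int(math.sqrt(num)) + 1):
--             if num % i == 0:
--                 isPrime = False
--                 break
--
--         # Update maxPrime and secondMaxPrime
--         if isPrime:
--             if num > maxPrime:
--                 secondMaxPrime = maxPrime
--                 maxPrime = num
--             elif num > secondMaxPrime and num != maxPrime:
--                 secondMaxPrime = num
--
--     return (maxPrime, secondMaxPrime)
-- ===== SOURCE B (Python) =====
-- import math
--
-- def find_max_primes(numbers):
--     primes = [n for n in numbers
--               if all(n % i for i in range(2, int(math.sqrt(n)) + 1))]
--     maxPrime = max(primes, default=0)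
--     secondMaxPrime = max((p for p in primes if p < maxPrime), default=0)
--     return (maxPrime, secondMaxPrime)
-- ===== Notes on version B (the rewrite author's own statement) =====
-- stated objective: simpler
-- what changed: Replaces A's single-pass two-variable max/second-max state machine with a prime filter followed by two max(..., default=0) passes (second pass over primes strictly below the first maximum).
import Mathlib
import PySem

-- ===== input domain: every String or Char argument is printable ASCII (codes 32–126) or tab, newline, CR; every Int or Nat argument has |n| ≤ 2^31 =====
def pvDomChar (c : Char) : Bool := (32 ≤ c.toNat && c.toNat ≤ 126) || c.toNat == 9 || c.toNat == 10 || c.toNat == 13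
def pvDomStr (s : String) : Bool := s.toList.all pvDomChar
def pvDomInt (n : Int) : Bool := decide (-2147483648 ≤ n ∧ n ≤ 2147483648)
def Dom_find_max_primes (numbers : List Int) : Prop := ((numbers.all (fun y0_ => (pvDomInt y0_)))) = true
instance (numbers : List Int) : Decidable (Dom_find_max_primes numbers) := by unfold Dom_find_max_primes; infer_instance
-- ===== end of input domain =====

-- B replaces A's single-pass two-variable max/second-max tracking by a prime filter followed by
-- two max(…, default=0) passes (objective: simpler); same return value on every list of nonnegative ints.

-- ===== PORT A =====
-- A's inner trial-division loop with break: for i in range(2, int(math.sqrt(num))+1): if num % i == 0: …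
-- int(math.sqrt(num)) is ported as Nat.sqrt of num.toNat: exact for 0 ≤ num ≤ 2^31 (inside Pre_/Dom).
def pvACheck (num : Int) : List Int → Bool
  | [] => true
  | i :: rest => if PySem.Int.mod num i == 0 then false else pvACheck num rest

-- A's update branch (the body under 'if isPrime:')
def pvAUpd (st : Int × Int) (num : Int) : Int × Int :=
  if num > st.1 then (num, st.1)
  else if num > st.2 ∧ num ≠ st.1 then (st.1, num)
  else st

def find_max_primes (numbers : List Int) : Int × Int :=
  numbers.foldl
    (fun st num =>
      if pvACheck num (PySem.List.pyRange 2 (((Int.toNat num).sqrt : Int) + 1) 1) then pvAUpd st num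
      else st)
    (0, 0)

-- ===== PORT B =====
-- B's predicate: all(n % i for i in range(2, int(math.sqrt(n)) + 1))
def pvBIsPrime (n : Int) : Bool :=
  (PySem.List.pyRange 2 (((Int.toNat n).sqrt : Int) + 1) 1).all (fun i => PySem.Int.mod n i != 0)

def find_max_primes_alt (numbers : List Int) : Int × Int :=
  let primes := numbers.filter pvBIsPrime
  let maxPrime := PySem.List.maxD primes (fun x => x) 0
  let secondMaxPrime :=
    PySem.List.maxD (primes.filter (fun p => decide (p < maxPrime))) (fun x => x) 0
  (maxPrime, secondMaxPrime)

-- ===== PRECONDITION & SPEC =====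
-- Pre_ excludes lists containing a negative number: there math.sqrt raises ValueError in A (and in B alike).
def Pre_find_max_primes (numbers : List Int) : Prop := ∀ n ∈ numbers, 0 ≤ n
instance (numbers : List Int) : Decidable (Pre_find_max_primes numbers) := by
  unfold Pre_find_max_primes; infer_instance

def pvWitness_find_max_primes : List Int := [2, 7, 7, 4, 10, 13, 1]

def Spec_find_max_primes (numbers : List Int) (out : Int × Int) : Prop := out = find_max_primes_alt numbers
instance (numbers : List Int) (out : Int × Int) : Decidable (Spec_find_max_primes numbers out) := by
  unfold Spec_find_max_primes; infer_instance

-- ===== CLAIM (what is proved, stated in full; the proofs are below) =====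
def Claim_equal_find_max_primes : Prop := ∀ (numbers : List Int), Dom_find_max_primes numbers → Pre_find_max_primes numbers → Spec_find_max_primes numbers (find_max_primes numbers)

-- ===== LEMMAS AND PROOFS =====

-- running max of a list, started at 0, and the running max of its elements strictly below that
def pvM (L : List Int) : Int := L.foldl max 0
def pvS (L : List Int) : Int := (L.filter (fun p => decide (p < pvM L))).foldl max 0

theorem pvACheck_eq_all (n : Int) (r : List Int) :
    pvACheck n r = r.all (fun i => PySem.Int.mod n i != 0) := by
  induction r with
  | nil => rfl
  | cons i rest ih =>
      simp only [pvACheck, List.all_cons, ih]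
      by_cases h : PySem.Int.mod n i = 0
      · simp [h]
      · simp [h]

theorem pvBIsPrime_eq (n : Int) :
    pvBIsPrime n = (PySem.List.pyRange 2 (((Int.toNat n).sqrt : Int) + 1) 1).all
      (fun i => PySem.Int.mod n i != 0) := rfl

theorem pvM_append (Q : List Int) (a : Int) : pvM (Q ++ [a]) = max (pvM Q) a := by
  simp [pvM, List.foldl_append]

theorem pvAUpd_step (Q : List Int) (a : Int) :
    pvAUpd (pvM Q, pvS Q) a = (pvM (Q ++ [a]), pvS (Q ++ [a])) := by
  have hub := (PySem.List.le_foldl_max Q 0).2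
  rcases lt_trichotomy (pvM Q) a with hgt | heq | hlt
  · -- a > current max: new state (a, old max)
    have hM : pvM (Q ++ [a]) = a := by rw [pvM_append]; omega
    have hS : pvS (Q ++ [a]) = pvM Q := by
      simp only [pvS, hM, List.filter_append]
      have h1 : Q.filter (fun p => decide (p < a)) = Q := by
        apply List.filter_eq_self.2
        intro x hx
        have hx' : x ≤ pvM Q := hub x hx
        simp only [decide_eq_true_eq]; omega
      simp [h1, pvM]
    simp only [pvAUpd, hM, hS]
    rw [if_pos (by exact hgt)]
  · -- a equals the current max: nothing changes
    have hM : pvM (Q ++ [a]) = pvM Q := by rw [pvM_append]; omega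
    have hS : pvS (Q ++ [a]) = pvS Q := by
      simp only [pvS, hM, List.filter_append]
      simp [heq]
    simp only [pvAUpd, hM, hS]
    rw [if_neg (by omega)]
    rw [if_neg (by rintro ⟨-, hne⟩; exact hne heq.symm)]
  · -- a below the current max: second slot becomes max(second, a)
    have hM : pvM (Q ++ [a]) = pvM Q := by rw [pvM_append]; omega
    have hS : pvS (Q ++ [a]) = max (pvS Q) a := by
      simp only [pvS, hM, List.filter_append]
      simp [hlt, List.foldl_append]
    simp only [pvAUpd, hM, hS]
    rw [if_neg (by omega)]
    by_cases hcase : a > pvS Q ∧ a ≠ pvM Q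
    · rw [if_pos hcase]
      have h2 : max (pvS Q) a = a := by omega
      rw [h2]
    · rw [if_neg hcase]
      have hle : a ≤ pvS Q := by
        by_contra hno
        exact hcase ⟨by omega, by omega⟩
      have h2 : max (pvS Q) a = pvS Q := by omega
      rw [h2]

theorem foldl_pvAUpd (P : List Int) : P.foldl pvAUpd (0, 0) = (pvM P, pvS P) := by
  induction P using List.reverseRecOn with
  | nil => rfl
  | append_singleton Q a ih =>
      rw [List.foldl_append, ih, List.foldl]
      exact pvAUpd_step Q a

theorem maxD_id_eq_pvM (L : List Int) (h : ∀ x ∈ L, 0 ≤ x) :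
    PySem.List.maxD L (fun x => x) 0 = pvM L := by
  cases L with
  | nil => rfl
  | cons x t =>
      have hx : max 0 x = x := max_eq_right (h x (List.mem_cons_self))
      simp [PySem.List.maxD, PySem.List.max?_id_cons, pvM, hx]

-- ===== VERDICT (by name: the statement is the Claim_ definition above) =====
theorem find_max_primes_spec : Claim_equal_find_max_primes := by
  intro numbers _ hpre
  unfold Spec_find_max_primes
  have hA : find_max_primes numbers = (numbers.filter pvBIsPrime).foldl pvAUpd (0, 0) := by
    unfold find_max_primes
    have : (fun (st : Int × Int) num =>
        if pvACheck num (PySem.List.pyRange 2 (((Int.toNat num).sqrt : Int) + 1) 1)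
        then pvAUpd st num else st) =
        (fun (st : Int × Int) num => if pvBIsPrime num then pvAUpd st num else st) := by
      funext st num
      rw [pvACheck_eq_all, ← pvBIsPrime_eq]
    rw [this, PySem.List.foldl_if_eq_foldl_filter]
  have hprimes_nonneg : ∀ x ∈ numbers.filter pvBIsPrime, 0 ≤ x := by
    intro x hx
    exact hpre x (List.mem_of_mem_filter hx)
  have hsnd_nonneg : ∀ x ∈ (numbers.filter pvBIsPrime).filter
      (fun p => decide (p < pvM (numbers.filter pvBIsPrime))), 0 ≤ x := by
    intro x hx
    exact hprimes_nonneg x (List.mem_of_mem_filter hx)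
  rw [hA, foldl_pvAUpd]
  unfold find_max_primes_alt
  simp only []
  rw [maxD_id_eq_pvM _ hprimes_nonneg]
  rw [maxD_id_eq_pvM _ hsnd_nonneg]
  rfl
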